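-- pv_equiv track=rewrite | github.com/SteffenAP/INF100 | lab5/uke_05_oppg_3.py | sort_by_sign
-- ===== SOURCE A (Python) =====
-- def sort_by_sign(a):
--     sorted_list = [ ]
--     for index, value in enumerate(a):
--         if value < 0:
--             sorted_list.append(value)
--     for index, value in enumerate(a):
--         if value == 0:
--             sorted_list.append(value)
--     for index, value in enumerate(a):
--         if value > 0:
--             sorted_list.append(value)
--     return sorted_list
-- ===== SOURCE B (Python) =====
-- def sort_by_sign(a):
--     neg, zero, pos = [], [], []
--     for value in a:
--         if value < 0:
--             neg.append(value)
--         elif value == 0: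
--             zero.append(value)
--         else:
--             pos.append(value)
--     return neg + zero + pos
-- ===== Notes on version B (the rewrite author's own statement) =====
-- stated objective: faster
-- what changed: Replaces A's three separate full scans of the list (one per sign class) with a single pass that maintains three buckets (neg, zero, pos) and concatenates them at the end.
import Mathlib
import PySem

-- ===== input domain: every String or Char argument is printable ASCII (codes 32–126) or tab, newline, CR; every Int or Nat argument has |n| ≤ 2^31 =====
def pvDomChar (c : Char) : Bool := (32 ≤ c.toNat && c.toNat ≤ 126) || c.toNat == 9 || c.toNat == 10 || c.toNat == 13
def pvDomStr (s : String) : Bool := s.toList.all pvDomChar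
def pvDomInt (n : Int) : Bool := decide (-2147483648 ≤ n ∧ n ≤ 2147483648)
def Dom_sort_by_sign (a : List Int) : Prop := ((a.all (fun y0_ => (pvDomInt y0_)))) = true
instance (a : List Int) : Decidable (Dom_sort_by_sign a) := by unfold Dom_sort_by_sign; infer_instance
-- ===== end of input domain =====

-- B fuses A's three separate full scans into one pass keeping three buckets (objective: faster by a constant factor).

-- ===== PORT A =====
-- three loops over enumerate(a), each appending matching values to sorted_list
def sort_by_sign (a : List Int) : List Int :=
  let sorted_list : List Int := []
  let sorted_list := (PySem.List.enumerate a).foldl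
    (fun acc p => if p.2 < 0 then acc ++ [p.2] else acc) sorted_list
  let sorted_list := (PySem.List.enumerate a).foldl
    (fun acc p => if p.2 = 0 then acc ++ [p.2] else acc) sorted_list
  let sorted_list := (PySem.List.enumerate a).foldl
    (fun acc p => if p.2 > 0 then acc ++ [p.2] else acc) sorted_list
  sorted_list

-- ===== PORT B =====
-- single pass maintaining three buckets, concatenated at the end
def sort_by_sign_alt (a : List Int) : List Int :=
  let st := a.foldl
    (fun (st : List Int × List Int × List Int) value =>
      let (neg, zero, pos) := st
      if value < 0 then (neg ++ [value], zero, pos)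
      else if value = 0 then (neg, zero ++ [value], pos)
      else (neg, zero, pos ++ [value]))
    ([], [], [])
  st.1 ++ st.2.1 ++ st.2.2

-- ===== PRECONDITION & SPEC =====
def Spec_sort_by_sign (a : List Int) (out : List Int) : Prop := out = sort_by_sign_alt a
instance (a : List Int) (out : List Int) : Decidable (Spec_sort_by_sign a out) := by unfold Spec_sort_by_sign; infer_instance

-- ===== CLAIM (what is proved, stated in full; the proofs are below) =====
def Claim_equal_sort_by_sign : Prop := ∀ (a : List Int), Dom_sort_by_sign a → Spec_sort_by_sign a (sort_by_sign a)

-- ===== LEMMAS AND PROOFS =====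

theorem pv_loop_neg (a : List Int) (s : Int) (acc : List Int) :
    (PySem.List.enumerate a s).foldl (fun acc q => if q.2 < 0 then acc ++ [q.2] else acc) acc
      = acc ++ a.filter (fun v => decide (v < 0)) := by
  induction a generalizing s acc with
  | nil => simp [PySem.List.enumerate_nil]
  | cons x xs ih =>
    simp only [PySem.List.enumerate_cons, List.foldl_cons, List.filter_cons]
    by_cases h : x < 0 <;> simp [h, ih]

theorem pv_loop_zero (a : List Int) (s : Int) (acc : List Int) :
    (PySem.List.enumerate a s).foldl (fun acc q => if q.2 = 0 then acc ++ [q.2] else acc) acc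
      = acc ++ a.filter (fun v => decide (v = 0)) := by
  induction a generalizing s acc with
  | nil => simp [PySem.List.enumerate_nil]
  | cons x xs ih =>
    simp only [PySem.List.enumerate_cons, List.foldl_cons, List.filter_cons]
    by_cases h : x = 0 <;> simp [h, ih]

theorem pv_loop_pos (a : List Int) (s : Int) (acc : List Int) :
    (PySem.List.enumerate a s).foldl (fun acc q => if q.2 > 0 then acc ++ [q.2] else acc) acc
      = acc ++ a.filter (fun v => decide (v > 0)) := by
  induction a generalizing s acc with
  | nil => simp [PySem.List.enumerate_nil]
  | cons x xs ih =>
    simp only [PySem.List.enumerate_cons, List.foldl_cons, List.filter_cons]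
    by_cases h : x > 0 <;> simp [h, ih]

theorem pv_A_eq_filters (a : List Int) :
    sort_by_sign a = a.filter (fun v => decide (v < 0)) ++ a.filter (fun v => decide (v = 0))
      ++ a.filter (fun v => decide (v > 0)) := by
  show ((PySem.List.enumerate a).foldl (fun acc q => if q.2 < 0 then acc ++ [q.2] else acc) []
      |> fun l => (PySem.List.enumerate a).foldl (fun acc q => if q.2 = 0 then acc ++ [q.2] else acc) l
      |> fun l => (PySem.List.enumerate a).foldl (fun acc q => if q.2 > 0 then acc ++ [q.2] else acc) l)
    = _
  simp only [pv_loop_neg, pv_loop_zero, pv_loop_pos]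
  simp [List.append_assoc]

theorem pv_B_invariant (a : List Int) (neg zero pos : List Int) :
    a.foldl
      (fun (st : List Int × List Int × List Int) value =>
        let (n, z, p) := st
        if value < 0 then (n ++ [value], z, p)
        else if value = 0 then (n, z ++ [value], p)
        else (n, z, p ++ [value]))
      (neg, zero, pos)
    = (neg ++ a.filter (fun v => v < 0), zero ++ a.filter (fun v => v = 0),
       pos ++ a.filter (fun v => v > 0)) := by
  induction a generalizing neg zero pos with
  | nil => simp
  | cons x xs ih =>
    by_cases h1 : x < 0
    · simp [h1, ih, show ¬ x = 0 by omega, show ¬ x > 0 by omega]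
    · by_cases h2 : x = 0
      · simp [h2, ih]
      · simp [h1, h2, ih, show x > 0 by omega]

-- ===== VERDICT (by name: the statement is the Claim_ definition above) =====
theorem sort_by_sign_spec : Claim_equal_sort_by_sign := by
  intro a _
  unfold Spec_sort_by_sign sort_by_sign_alt
  rw [pv_A_eq_filters, pv_B_invariant]
  simp [List.append_assoc]
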